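-- pv_equiv track=rewrite | github.com/BorONE-stud/bd-submitter | mr.py | map_task
-- ===== SOURCE A (Python) =====
-- def map_task(task):
--   tasks = {
--     'hw1': [ 1,  2, 10, 17, 31,  33,  38,  44, 53, 62],
--     'hw2': [11, 12, 15, 20, 22,  29,  30,  68, 74, 86],
--     'hw3': [ 7,  9, 14, 16, 23,  32,  48,  84],
--     'hw4': [37, 41, 47, 70, 73,  87, 102, 112],
--     'hw5': [65, 82, 90, 96, 98, 100, 105, 109],
--   }
--   for hw, hw_tasks in tasks.items():
--     try:
--       ord_task = hw_tasks.index(task) + 1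
--       return {
--         'hw': hw,
--         'ord_task': f'task{ord_task}',
--         'site_task': str(task)
--       }
--     except:
--       pass
--   raise ValueError(f'task {task} not found')
-- ===== SOURCE B (Python) =====
-- # Flat table of (task, hw, ordinal) rows, sorted by task number,
-- # searched by binary search instead of linear scans per homework.
-- ROWS = [
--   (1, 'hw1', 1), (2, 'hw1', 2), (7, 'hw3', 1), (9, 'hw3', 2), (10, 'hw1', 3),
--   (11, 'hw2', 1), (12, 'hw2', 2), (14, 'hw3', 3), (15, 'hw2', 3), (16, 'hw3', 4),
--   (17, 'hw1', 4), (20, 'hw2', 4), (22, 'hw2', 5), (23, 'hw3', 5), (29, 'hw2', 6),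
--   (30, 'hw2', 7), (31, 'hw1', 5), (32, 'hw3', 6), (33, 'hw1', 6), (37, 'hw4', 1),
--   (38, 'hw1', 7), (41, 'hw4', 2), (44, 'hw1', 8), (47, 'hw4', 3), (48, 'hw3', 7),
--   (53, 'hw1', 9), (62, 'hw1', 10), (65, 'hw5', 1), (68, 'hw2', 8), (70, 'hw4', 4),
--   (73, 'hw4', 5), (74, 'hw2', 9), (82, 'hw5', 2), (84, 'hw3', 8), (86, 'hw2', 10),
--   (87, 'hw4', 6), (90, 'hw5', 3), (96, 'hw5', 4), (98, 'hw5', 5), (100, 'hw5', 6),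
--   (102, 'hw4', 7), (105, 'hw5', 7), (109, 'hw5', 8), (112, 'hw4', 8),
-- ]
--
-- def map_task(task):
--   lo, hi = 0, len(ROWS)
--   while lo < hi:
--     mid = (lo + hi) // 2
--     if ROWS[mid][0] < task:
--       lo = mid + 1
--     else:
--       hi = mid
--   if lo < len(ROWS) and ROWS[lo][0] == task:
--     _, hw, ord_task = ROWS[lo]
--     return {'hw': hw, 'ord_task': f'task{ord_task}', 'site_task': str(task)}
--   raise ValueError(f'task {task} not found')
-- ===== Notes on version B (the rewrite author's own statement) =====
-- stated objective: alternative
-- what changed: Replaces A's loop of per-homework list.index linear scans by one flat table of (task, hw, ordinal) rows sorted by task number, searched with a hand-written binary search (bisect_left loop).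
import Mathlib
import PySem

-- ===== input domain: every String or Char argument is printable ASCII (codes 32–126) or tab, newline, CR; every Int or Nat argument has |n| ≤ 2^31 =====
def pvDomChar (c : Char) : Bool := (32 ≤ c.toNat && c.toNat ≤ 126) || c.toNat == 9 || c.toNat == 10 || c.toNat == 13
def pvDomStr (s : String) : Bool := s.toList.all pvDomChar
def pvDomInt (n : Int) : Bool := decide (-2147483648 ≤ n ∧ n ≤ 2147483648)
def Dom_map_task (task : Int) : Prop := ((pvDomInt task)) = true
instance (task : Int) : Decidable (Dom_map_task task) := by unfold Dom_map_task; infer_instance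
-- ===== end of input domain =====

-- B replaces A's per-homework list.index linear scans by binary search over one
-- flat (task, hw, ordinal) table sorted by task number (alternative algorithm).
-- Equivalence is about the returned value; where A raises ValueError is outside Pre_.

-- ===== PORT A =====
def pvTablesA : List (String × List Int) :=
  [("hw1", [1, 2, 10, 17, 31, 33, 38, 44, 53, 62]),
   ("hw2", [11, 12, 15, 20, 22, 29, 30, 68, 74, 86]),
   ("hw3", [7, 9, 14, 16, 23, 32, 48, 84]),
   ("hw4", [37, 41, 47, 70, 73, 87, 102, 112]),
   ("hw5", [65, 82, 90, 96, 98, 100, 105, 109])]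

-- the for-loop over tasks.items(): list.index raising ValueError is the 'except: pass' branch
def pvLoopA (items : List (String × List Int)) (task : Int) : Option (List (String × String)) :=
  match items with
  | [] => none
  | (hw, hw_tasks) :: rest =>
    match PySem.List.index? hw_tasks task with
    | some i => some [("hw", hw),
                      ("ord_task", "task" ++ PySem.Int.toStr ((i : Int) + 1)),
                      ("site_task", PySem.Int.toStr task)]
    | none => pvLoopA rest task

def map_task (task : Int) : List (String × String) :=
  (pvLoopA pvTablesA task).getD []   -- none = the final 'raise ValueError', excluded by Pre_

-- ===== PORT B =====
-- ROWS: flat table sorted by task number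
def pvRowsB : List (Int × String × Int) :=
  [(1, "hw1", 1), (2, "hw1", 2), (7, "hw3", 1), (9, "hw3", 2), (10, "hw1", 3),
   (11, "hw2", 1), (12, "hw2", 2), (14, "hw3", 3), (15, "hw2", 3), (16, "hw3", 4),
   (17, "hw1", 4), (20, "hw2", 4), (22, "hw2", 5), (23, "hw3", 5), (29, "hw2", 6),
   (30, "hw2", 7), (31, "hw1", 5), (32, "hw3", 6), (33, "hw1", 6), (37, "hw4", 1),
   (38, "hw1", 7), (41, "hw4", 2), (44, "hw1", 8), (47, "hw4", 3), (48, "hw3", 7),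
   (53, "hw1", 9), (62, "hw1", 10), (65, "hw5", 1), (68, "hw2", 8), (70, "hw4", 4),
   (73, "hw4", 5), (74, "hw2", 9), (82, "hw5", 2), (84, "hw3", 8), (86, "hw2", 10),
   (87, "hw4", 6), (90, "hw5", 3), (96, "hw5", 4), (98, "hw5", 5), (100, "hw5", 6),
   (102, "hw4", 7), (105, "hw5", 7), (109, "hw5", 8), (112, "hw4", 8)]

-- the 'while lo < hi' bisect_left loop; in-range ROWS[mid][0] read as getD; fuel = hi - lo bounds the iterations
def pvBisectB (task : Int) (lo hi fuel : Nat) : Nat :=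
  match fuel with
  | 0 => lo
  | fuel + 1 =>
    if lo < hi then
      let mid := (lo + hi) / 2
      if ((pvRowsB.getD mid (0, "", 0)).1 < task) then pvBisectB task (mid + 1) hi fuel
      else pvBisectB task lo mid fuel
    else lo

def map_task_alt (task : Int) : List (String × String) :=
  let lo := pvBisectB task 0 pvRowsB.length pvRowsB.length
  if lo < pvRowsB.length ∧ (pvRowsB.getD lo (0, "", 0)).1 = task then
    let row := pvRowsB.getD lo (0, "", 0)
    [("hw", row.2.1),
     ("ord_task", "task" ++ PySem.Int.toStr row.2.2),
     ("site_task", PySem.Int.toStr task)]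
  else []   -- the 'raise ValueError' path, excluded by Pre_

-- ===== PRECONDITION & SPEC =====
-- A raises ValueError on any task number absent from the five tables; Pre_ admits exactly the known task numbers.
def Pre_map_task (task : Int) : Prop :=
  task ∈ ([1, 2, 10, 17, 31, 33, 38, 44, 53, 62,
           11, 12, 15, 20, 22, 29, 30, 68, 74, 86,
           7, 9, 14, 16, 23, 32, 48, 84,
           37, 41, 47, 70, 73, 87, 102, 112,
           65, 82, 90, 96, 98, 100, 105, 109] : List Int)
instance (task : Int) : Decidable (Pre_map_task task) := by unfold Pre_map_task; infer_instance

def pvWitness_map_task : Int := (17)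

def Spec_map_task (task : Int) (out : List (String × String)) : Prop := out = map_task_alt task
instance (task : Int) (out : List (String × String)) : Decidable (Spec_map_task task out) := by unfold Spec_map_task; infer_instance

-- ===== CLAIM (what is proved, stated in full; the proofs are below) =====
def Claim_equal_map_task : Prop := ∀ (task : Int), Dom_map_task task → Pre_map_task task → Spec_map_task task (map_task task)

-- ===== LEMMAS AND PROOFS =====

-- ===== VERDICT (by name: the statement is the Claim_ definition above) =====
set_option maxRecDepth 8000 in
theorem map_task_spec : Claim_equal_map_task := by
  intro task _ hpre
  unfold Pre_map_task at hpre
  fin_cases hpre <;> decide
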